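-- pv_equiv track=rewrite | github.com/choderalab/missense-kinase-toolkit | missense_kinase_toolkit/databases/mkt/databases/ml.py | revise_dict_col
-- ===== SOURCE A (Python) =====
-- def revise_dict_col(dict_in):
--     """Revise the input dictionary to ensure keys are formatted correctly for clean legend.
--
--     Parameters
--     ----------
--     dict_in : dict
--         Input dictionary with keys that may contain multiple values separated by commas.
--
--     Returns
--     -------
--     dict
--         Revised dictionary with keys formatted as single values or grouped by color.
--     """
--     if all([":" in k for k in dict_in.keys()]):
--         # KLIFS keys
--         dict_temp = {k.split(":")[0]: v for k, v in dict_in.items()}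
--         set_colors = set(dict_temp.values())
--         list_keys = []
--         for color in set_colors:
--             list_temp = [k for k, v in dict_temp.items() if v == color]
--             list_temp.sort()
--             list_keys.append(", ".join(list_temp))
--         return dict(zip(list_keys, set_colors))
--     else:
--         # kinase and biochem properties keys
--         return {k.split(" ")[0]: v for k, v in dict_in.items()}
-- ===== SOURCE B (Python) =====
-- def revise_dict_col(dict_in):
--     if all(":" in k for k in dict_in):
--         # KLIFS keys: strip at ':', then group keys by color with an
--         # association list (one pass; first-occurrence color order)
--         stripped = dict((k.split(":")[0], v) for k, v in dict_in.items())
--         groups = []  # list of (color, keys) in first-occurrence order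
--         for k, v in stripped.items():
--             for g in groups:
--                 if g[0] == v:
--                     g[1].append(k)
--                     break
--             else:
--                 groups.append((v, [k]))
--         return {", ".join(sorted(ks)): c for c, ks in groups}
--     else:
--         # kinase and biochem properties keys
--         return {k.split(" ")[0]: v for k, v in dict_in.items()}
-- ===== Notes on version B (the rewrite author's own statement) =====
-- stated objective: alternative
-- what changed: Replaces A's per-color rescan of the stripped items (a set of colors, then one full filter pass per color, zipped back into a dict) with a single grouping pass that maintains an association list of (color, keys) groups and appends each key to its color's group as it is seen.
import Mathlib
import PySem

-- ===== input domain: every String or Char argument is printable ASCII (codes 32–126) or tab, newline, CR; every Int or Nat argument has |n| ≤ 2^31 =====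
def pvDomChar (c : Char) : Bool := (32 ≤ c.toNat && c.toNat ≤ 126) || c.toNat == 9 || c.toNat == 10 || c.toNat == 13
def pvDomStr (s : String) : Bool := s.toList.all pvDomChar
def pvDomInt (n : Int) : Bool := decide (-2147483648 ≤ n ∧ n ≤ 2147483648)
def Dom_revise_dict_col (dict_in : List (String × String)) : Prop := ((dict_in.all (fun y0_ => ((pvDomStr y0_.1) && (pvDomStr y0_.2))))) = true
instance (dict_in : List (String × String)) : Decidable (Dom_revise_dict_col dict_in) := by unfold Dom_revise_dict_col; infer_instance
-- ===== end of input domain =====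

-- B replaces A's per-color rescan of all stripped items (one filter pass per distinct
-- color drawn from a set) with a single grouping pass over an association list of
-- (color, keys) groups; return value unchanged.

-- ===== PORT A =====
-- k.split(sep)[0] for a nonempty literal sep: split? is always `some` and never `some []`,
-- so taking the head of the defaulted result is exact
def pvHead0 (xs? : Option (List String)) : String := (xs?.getD []).headD ""

def revise_dict_col (dict_in : List (String × String)) : List (String × String) :=
  if dict_in.all (fun p => PySem.Str.isIn ":" p.1) then
    let dict_temp : PySem.Dict String String :=
      dict_in.foldl (fun d p => d.insert (pvHead0 (PySem.Str.split? p.1 ":")) p.2) PySem.Dict.empty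
    let set_colors : PySem.Set String := PySem.Set.ofList dict_temp.values
    let list_keys : List String :=
      set_colors.foldl (fun acc color =>
        acc ++ [PySem.Str.join ", " (PySem.List.sorted
          ((dict_temp.items.filter (fun q => q.2 == color)).map (·.1)) (fun x => x) false)]) []
    (PySem.Dict.ofList (list_keys.zip set_colors)).items
  else
    (PySem.Dict.ofList (dict_in.map (fun p => (pvHead0 (PySem.Str.split? p.1 " "), p.2)))).items

-- ===== PORT B =====
-- the inner `for g in groups: … break / else append` loop of Source B, as structural recursion
def pvAddKey : List (String × List String) → String → String → List (String × List String)
  | [], c, k => [(c, [k])]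
  | (c', ks) :: t, c, k => if c' == c then (c', ks ++ [k]) :: t else (c', ks) :: pvAddKey t c k

def revise_dict_col_alt (dict_in : List (String × String)) : List (String × String) :=
  if dict_in.all (fun p => PySem.Str.isIn ":" p.1) then
    let stripped : PySem.Dict String String :=
      PySem.Dict.ofList (dict_in.map (fun p => (pvHead0 (PySem.Str.split? p.1 ":"), p.2)))
    let groups : List (String × List String) :=
      stripped.items.foldl (fun gs p => pvAddKey gs p.2 p.1) []
    (PySem.Dict.ofList (groups.map (fun g =>
      (PySem.Str.join ", " (PySem.List.sorted g.2 (fun x => x) false), g.1)))).items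
  else
    (PySem.Dict.ofList (dict_in.map (fun p => (pvHead0 (PySem.Str.split? p.1 " "), p.2)))).items

-- ===== PRECONDITION & SPEC =====
def Spec_revise_dict_col (dict_in : List (String × String)) (out : List (String × String)) : Prop := out = revise_dict_col_alt dict_in
instance (dict_in : List (String × String)) (out : List (String × String)) : Decidable (Spec_revise_dict_col dict_in out) := by unfold Spec_revise_dict_col; infer_instance

-- ===== CLAIM (what is proved, stated in full; the proofs are below) =====
def Claim_equal_revise_dict_col : Prop := ∀ (dict_in : List (String × String)), Dom_revise_dict_col dict_in → Spec_revise_dict_col dict_in (revise_dict_col dict_in)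

-- ===== LEMMAS AND PROOFS =====

theorem pvAddKey_of_not_mem (gs : List (String × List String)) (c k : String)
    (h : c ∉ gs.map (·.1)) : pvAddKey gs c k = gs ++ [(c, [k])] := by
  induction gs with
  | nil => rfl
  | cons g t ih =>
    obtain ⟨c', ks⟩ := g
    simp only [List.map_cons, List.mem_cons, not_or] at h
    simp [pvAddKey, beq_iff_eq, Ne.symm h.1, ih h.2]

theorem pvAddKey_map_mem (s : List String) (g : String → List String) (c k : String)
    (hnd : s.Nodup) (hc : c ∈ s) :
    pvAddKey (s.map (fun c' => (c', g c'))) c k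
      = s.map (fun c' => (c', g c' ++ if c' = c then [k] else [])) := by
  induction s with
  | nil => cases hc
  | cons a t ih =>
    rcases List.nodup_cons.mp hnd with ⟨ha, hndt⟩
    by_cases hac : a = c
    · subst hac
      simp only [List.map_cons, pvAddKey, beq_self_eq_true, if_true]
      congr 1
      exact (List.map_congr_left fun x hx => by
        have : x ≠ a := fun h => ha (h ▸ hx)
        simp [this]).symm
    · rcases List.mem_cons.mp hc with hc' | hc'
      · exact absurd hc'.symm hac
      · simp only [List.map_cons, pvAddKey, beq_iff_eq, if_neg hac]
        rw [ih hndt hc']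
        simp

theorem pv_filter_nil (l : List (String × String)) (c : String)
    (h : c ∉ l.map (·.2)) : l.filter (fun q => q.2 == c) = [] := by
  rw [List.filter_eq_nil_iff]
  intro q hq
  simp only [beq_iff_eq]
  exact fun he => h (he ▸ List.mem_map_of_mem hq)

-- the grouping fold of B produces exactly one (color, keys-with-that-color) group per
-- distinct color, in first-occurrence order
theorem pv_groups (l : List (String × String)) :
    l.foldl (fun gs p => pvAddKey gs p.2 p.1) []
      = (PySem.Set.ofList (l.map (·.2))).map
          (fun c => (c, (l.filter (fun q => q.2 == c)).map (·.1))) := by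
  induction l using List.reverseRecOn with
  | nil => rfl
  | append_singleton t p ih =>
    obtain ⟨k, c⟩ := p
    rw [List.foldl_append, List.foldl_cons, List.foldl_nil, ih]
    simp only [List.map_append, List.map_cons, List.map_nil]
    rw [PySem.Set.ofList_append_singleton]
    by_cases hc : c ∈ PySem.Set.ofList (t.map (·.2))
    · rw [PySem.Set.add_of_mem hc,
        pvAddKey_map_mem _ _ c k (PySem.Set.nodup_ofList _) hc]
      refine List.map_congr_left fun x _ => ?_
      by_cases hxc : x = c
      · subst hxc; simp [List.filter_append]
      · have hcx : ¬c = x := fun hh => hxc hh.symm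
        simp [List.filter_append, beq_iff_eq, hxc, hcx]
    · rw [PySem.Set.add_of_not_mem hc,
        pvAddKey_of_not_mem _ c k (by simpa [List.map_map, Function.comp_def] using hc)]
      rw [List.map_append]
      congr 1
      · refine List.map_congr_left fun x hx => ?_
        have hcx : ¬c = x := fun hh => hc (hh ▸ (hh ▸ hx))
        simp [List.filter_append, beq_iff_eq, hcx]
      · have hcn : c ∉ t.map (·.2) := fun h => hc ((PySem.Set.mem_ofList _ _).mpr h)
        simp [List.filter_append, pv_filter_nil t c hcn]

theorem pv_zip_map_self {α β : Type} (S : List α) (f : α → β) :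
    (S.map f).zip S = S.map (fun c => (f c, c)) := by
  induction S with
  | nil => rfl
  | cons a t ih => simp [ih]

-- ===== VERDICT (by name: the statement is the Claim_ definition above) =====
theorem revise_dict_col_spec : Claim_equal_revise_dict_col := by
  intro l _
  unfold Spec_revise_dict_col revise_dict_col revise_dict_col_alt
  split_ifs with h
  · dsimp only
    have hdict : PySem.Dict.ofList (l.map (fun p => (pvHead0 (PySem.Str.split? p.1 ":"), p.2)))
        = l.foldl (fun d p => d.insert (pvHead0 (PySem.Str.split? p.1 ":")) p.2) PySem.Dict.empty := by
      simp [PySem.Dict.ofList, PySem.Dict.update, List.foldl_map]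
    rw [hdict]
    set d : PySem.Dict String String :=
      l.foldl (fun d p => d.insert (pvHead0 (PySem.Str.split? p.1 ":")) p.2) PySem.Dict.empty with hd
    rw [PySem.List.foldl_append_singleton_eq_map, List.nil_append, pv_zip_map_self, pv_groups]
    simp only [List.map_map, Function.comp_def, PySem.Dict.values]
  · rfl
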